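-- pv_equiv track=rewrite | github.com/magicaltrap/clickbait_weka | extracting_methods.py | extract_bait_words
-- ===== SOURCE A (Python) =====
-- def extract_bait_words(word_list):
--     bait_word_list = ['you', 'best', 'greatest', 'weirdest', 'most', 'worst', 'funniest', 'incredible', 'secret',
--                       'remarkable', 'miracle', 'magic', 'easier', 'should', 'popular', 'never', 'need', 'world',
--                       'happened', 'guy', 'ever', 'cheapest', 'grossest']
--
--     number_of_bait_words = 0
--     presence_of_bait_words = False
--
--     for token in word_list:
--         if token in bait_word_list:
--             number_of_bait_words += 1
--             presence_of_bait_words = True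
--
--     return number_of_bait_words, presence_of_bait_words
-- ===== SOURCE B (Python) =====
-- def extract_bait_words(word_list):
--     bait_word_list = ['you', 'best', 'greatest', 'weirdest', 'most', 'worst', 'funniest', 'incredible', 'secret',
--                       'remarkable', 'miracle', 'magic', 'easier', 'should', 'popular', 'never', 'need', 'world',
--                       'happened', 'guy', 'ever', 'cheapest', 'grossest']
--     number_of_bait_words = sum(word_list.count(w) for w in bait_word_list)
--     return number_of_bait_words, number_of_bait_words > 0
-- ===== Notes on version B (the rewrite author's own statement) =====
-- stated objective: idiomatic
-- what changed: B inverts the traversal: instead of membership-testing every input token against the bait list while threading a count and a flag, it iterates over the fixed 23 bait words, summing word_list.count(w), and derives the presence flag from the total.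
import Mathlib
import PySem

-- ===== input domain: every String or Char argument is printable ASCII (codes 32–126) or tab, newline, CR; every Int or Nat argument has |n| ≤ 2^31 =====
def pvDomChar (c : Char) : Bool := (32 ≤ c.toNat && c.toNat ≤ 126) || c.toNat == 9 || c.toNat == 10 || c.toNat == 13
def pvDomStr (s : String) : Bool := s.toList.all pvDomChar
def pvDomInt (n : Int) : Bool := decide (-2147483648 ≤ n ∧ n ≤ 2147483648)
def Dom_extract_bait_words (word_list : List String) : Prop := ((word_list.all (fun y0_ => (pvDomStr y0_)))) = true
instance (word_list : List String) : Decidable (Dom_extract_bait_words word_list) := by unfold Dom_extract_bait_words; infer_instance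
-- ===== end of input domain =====

-- B inverts the traversal: it iterates over the fixed bait-word list, summing word_list.count(w),
-- instead of membership-testing each input token; the presence flag is derived from the total (idiomatic).

-- the fixed bait-word list (the same literal in both Pythons)
def baitWords : List String :=
  ["you", "best", "greatest", "weirdest", "most", "worst", "funniest", "incredible", "secret",
   "remarkable", "miracle", "magic", "easier", "should", "popular", "never", "need", "world",
   "happened", "guy", "ever", "cheapest", "grossest"]

-- ===== PORT A =====
def extract_bait_words (word_list : List String) : Int × Bool :=
  word_list.foldl
    (fun st token => if token ∈ baitWords then (st.1 + 1, true) else st)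
    ((0 : Int), false)

-- ===== PORT B =====
def extract_bait_words_alt (word_list : List String) : Int × Bool :=
  let n : Int := baitWords.foldl (fun acc w => acc + PySem.List.count word_list w) 0
  (n, decide (n > 0))

-- ===== PRECONDITION & SPEC =====
def Spec_extract_bait_words (word_list : List String) (out : Int × Bool) : Prop := out = extract_bait_words_alt word_list
instance (word_list : List String) (out : Int × Bool) : Decidable (Spec_extract_bait_words word_list out) := by unfold Spec_extract_bait_words; infer_instance

-- ===== CLAIM (what is proved, stated in full; the proofs are below) =====
def Claim_equal_extract_bait_words : Prop := ∀ (word_list : List String), Dom_extract_bait_words word_list → Spec_extract_bait_words word_list (extract_bait_words word_list)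

-- ===== LEMMAS AND PROOFS =====

-- A's loop computes a running count of tokens that lie in baitWords and a flag that is their disjunction
theorem pvA_loop (wl : List String) (n : Int) (b : Bool) :
    wl.foldl (fun st token => if token ∈ baitWords then (st.1 + 1, true) else st) (n, b)
      = (n + (wl.countP (fun t => decide (t ∈ baitWords)) : Int),
         b || wl.any (fun t => decide (t ∈ baitWords))) := by
  induction wl generalizing n b with
  | nil => simp
  | cons t rest ih =>
    simp only [List.foldl_cons, List.countP_cons, List.any_cons]
    by_cases h : t ∈ baitWords
    · simp [h, ih]; ring
    · simp [h, ih]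

-- countP splits over a disjunction of pointwise-disjoint predicates
theorem pvCountP_or {α : Type} (p q : α → Bool) (h : ∀ t, ¬(p t = true ∧ q t = true)) :
    ∀ wl : List α, wl.countP (fun t => p t || q t) = wl.countP p + wl.countP q := by
  intro wl
  induction wl with
  | nil => simp
  | cons t rest ih =>
    simp only [List.countP_cons, ih]
    cases hp : p t <;> cases hq : q t <;> simp_all <;> omega
    
-- summing counts over a duplicate-free list of keys is counting membership
theorem pvSum_count (wl : List String) :
    ∀ bs : List String, bs.Nodup →
      (bs.map (fun w => wl.count w)).sum = wl.countP (fun t => decide (t ∈ bs)) := by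
  intro bs
  induction bs with
  | nil => simp
  | cons b rest ih =>
    intro hnd
    rcases List.nodup_cons.mp hnd with ⟨hb, hrest⟩
    have hsplit := pvCountP_or (fun t => t == b) (fun t => decide (t ∈ rest))
      (by intro t ⟨h1, h2⟩
          exact hb (by simpa using (beq_iff_eq.mp h1) ▸ (by simpa using h2)))
      wl
    simp only [List.map_cons, List.sum_cons, ih hrest]
    rw [List.count]
    have : (fun t => decide (t ∈ (b :: rest))) = (fun t => (t == b) || decide (t ∈ rest)) := by
      funext t; by_cases h : t = b <;> simp [h, List.mem_cons]
    rw [this, hsplit]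

theorem extract_bait_words_eq (wl : List String) :
    extract_bait_words wl = extract_bait_words_alt wl := by
  unfold extract_bait_words extract_bait_words_alt
  rw [pvA_loop]
  dsimp only
  rw [PySem.List.foldl_add]
  have hs : (baitWords.map (fun w => ((PySem.List.count wl w : Nat) : Int))).sum
      = ((wl.countP (fun t => decide (t ∈ baitWords)) : Nat) : Int) := by
    rw [← pvSum_count wl baitWords (by decide), Nat.cast_list_sum, List.map_map]
    rfl
  rw [hs]
  simp only [Prod.mk.injEq]
  refine ⟨trivial, ?_⟩
  simp only [Bool.false_or, zero_add]
  rcases h : wl.any (fun t => decide (t ∈ baitWords)) with _ | _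
  · simp only [List.any_eq_false] at h
    have : wl.countP (fun t => decide (t ∈ baitWords)) = 0 := by
      rw [List.countP_eq_zero]; intro a ha; simpa using h a ha
    simp [this]
  · simp only [List.any_eq_true] at h
    rcases h with ⟨a, ha, hpa⟩
    simp
    exact ⟨a, ha, by simpa using hpa⟩

-- ===== VERDICT (by name: the statement is the Claim_ definition above) =====
theorem extract_bait_words_spec : Claim_equal_extract_bait_words := by
  intro wl _
  unfold Spec_extract_bait_words
  exact extract_bait_words_eq wl
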